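-- pv_equiv track=rewrite | github.com/kai3n/Leetcode | LeetCode/809. Expressive Words.py | check
-- ===== SOURCE A (Python) =====
-- def check(S, W):
--     i, j, n, m = 0, 0, len(S), len(W)
--     for i in range(n):
--         if j < m and S[i] == W[j]:
--             j += 1
--         elif S[i - 1:i + 2] != S[i] * 3 and S[i] * 3 != S[i - 2:i + 1]:
--             return False
--     return j == m
-- ===== SOURCE B (Python) =====
-- def _rle(s):
--     # run-length encode: list of (char, run length) groups, one outer step per run
--     groups = []
--     i = 0
--     while i < len(s):
--         j = i + 1
--         while j < len(s) and s[j] == s[i]: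
--             j += 1
--         groups.append((s[i], j - i))
--         i = j
--     return groups
--
-- def check(S, W):
--     gs, gw = _rle(S), _rle(W)
--     if len(gs) != len(gw):
--         return False
--     for (cs, ks), (cw, kw) in zip(gs, gw):
--         if cs != cw:
--             return False
--         if ks != kw and (ks < 3 or ks < kw):
--             return False
--     return True
-- ===== Notes on version B (the rewrite author's own statement) =====
-- stated objective: alternative
-- what changed: B run-length-encodes both strings into (char,count) groups and compares the group lists pairwise (equal chars, and count_s == count_w or count_s >= 3 > fewer), replacing A's character-by-character two-pointer scan with its triple-window slice tests.
import Mathlib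
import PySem

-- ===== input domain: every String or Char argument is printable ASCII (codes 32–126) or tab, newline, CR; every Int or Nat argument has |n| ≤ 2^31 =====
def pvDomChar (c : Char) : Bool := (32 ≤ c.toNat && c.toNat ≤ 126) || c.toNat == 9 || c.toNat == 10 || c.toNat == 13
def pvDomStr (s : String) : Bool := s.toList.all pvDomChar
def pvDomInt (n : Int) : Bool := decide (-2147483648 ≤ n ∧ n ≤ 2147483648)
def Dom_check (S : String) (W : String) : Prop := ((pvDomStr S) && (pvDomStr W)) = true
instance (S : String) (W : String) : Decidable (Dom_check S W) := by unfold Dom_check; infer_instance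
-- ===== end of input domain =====

-- B replaces A's character-by-character two-pointer scan (with its triple-window slice
-- tests) by run-length encoding both strings and comparing the group lists pairwise;
-- an alternative decomposition of the same task, return values proved equal everywhere.

-- ===== PORT A =====
-- the `for i in range(n)` loop with its early `return False`, as the obvious recursion on i
def checkGo (s w : List Char) (i j : Int) : Bool :=
  if h : i < (s.length : Int) then
    if decide (j < (w.length : Int)) && (PySem.List.pyGetD s i 'a' == PySem.List.pyGetD w j 'a') then
      checkGo s w (i + 1) (j + 1)
    else if (PySem.List.slice s (some (i - 1)) (some (i + 2)) != List.replicate 3 (PySem.List.pyGetD s i 'a'))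
            && (List.replicate 3 (PySem.List.pyGetD s i 'a') != PySem.List.slice s (some (i - 2)) (some (i + 1))) then
      false
    else
      checkGo s w (i + 1) j
  else
    decide (j = (w.length : Int))
termination_by ((s.length : Int) - i).toNat
decreasing_by all_goals omega

def check (S : String) (W : String) : Bool :=
  checkGo S.toList W.toList 0 0

-- ===== PORT B =====
-- Source B's _rle: the recursive run-length encoding into (char, run length) groups
def rle (s : List Char) : List (Char × Nat) :=
  match s with
  | [] => []
  | c :: rest =>
      (c, (rest.takeWhile (· == c)).length + 1) :: rle (rest.dropWhile (· == c))
termination_by s.length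
decreasing_by
  simp only [List.length_cons]
  exact Nat.lt_succ_of_le (List.length_dropWhile_le _ _)

-- Source B's length check plus zip loop, as one paired recursion over the two group lists
def cmpGroups (gs gw : List (Char × Nat)) : Bool :=
  match gs, gw with
  | [], [] => true
  | (cs, ks) :: gs', (cw, kw) :: gw' =>
      if cs != cw then false
      else if (ks != kw) && (decide (ks < 3) || decide (ks < kw)) then false
      else cmpGroups gs' gw'
  | _, _ => false

def check_alt (S : String) (W : String) : Bool :=
  cmpGroups (rle S.toList) (rle W.toList)

-- ===== PRECONDITION & SPEC =====
def Spec_check (S : String) (W : String) (out : Bool) : Prop := out = check_alt S W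
instance (S : String) (W : String) (out : Bool) : Decidable (Spec_check S W out) := by unfold Spec_check; infer_instance

-- ===== CLAIM (what is proved, stated in full; the proofs are below) =====
def Claim_equal_check : Prop := ∀ (S : String) (W : String), Dom_check S W → Spec_check S W (check S W)

-- ===== LEMMAS AND PROOFS =====

theorem head?_dropWhile_ne (p : Char → Bool) : ∀ (l : List Char) (y : Char), ((l.dropWhile p).head? = some y) → p y = false := by
  intro l
  induction l with
  | nil => intro y h; simp at h
  | cons a t ih =>
    intro y h
    by_cases hp : p a
    · simp [hp] at h; exact ih y h
    · simp [hp] at h; subst h; simpa using hp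

theorem takeWhile_eq_replicate (l : List Char) (c : Char) :
    l.takeWhile (· == c) = List.replicate (l.takeWhile (· == c)).length c := by
  rw [List.eq_replicate_iff]
  refine ⟨rfl, fun b hb => ?_⟩
  have := List.mem_takeWhile_imp hb
  simpa using this

theorem run_split (c : Char) (d : List Char) (hd : ∀ y, d.head? = some y → y ≠ c) :
    ∀ k : Nat, (List.replicate k c ++ d).takeWhile (· == c) = List.replicate k c ∧
         (List.replicate k c ++ d).dropWhile (· == c) = d := by
  intro k
  induction k with
  | zero =>
    simp only [List.replicate_zero, List.nil_append]
    cases d with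
    | nil => simp
    | cons y t =>
      have : (y == c) = false := by
        have := hd y rfl
        simpa using this
      simp [this]
  | succ n ih =>
    simp only [List.replicate_succ, List.cons_append, List.takeWhile_cons, List.dropWhile_cons]
    simp [ih]

theorem rle_run (c : Char) (k : Nat) (d : List Char) (hk : 1 ≤ k) (hd : ∀ y, d.head? = some y → y ≠ c) :
    rle (List.replicate k c ++ d) = (c, k) :: rle d := by
  obtain ⟨k', rfl⟩ : ∃ k', k = k' + 1 := ⟨k - 1, by omega⟩
  rw [List.replicate_succ, List.cons_append, rle]
  rw [(run_split c d hd k').1, (run_split c d hd k').2]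
  simp

theorem getS (u d : List Char) (c : Char) (k a : Nat) (ha : a < k) :
    (u ++ (List.replicate k c ++ d))[u.length + a]? = some c := by
  rw [List.getElem?_append_right (by omega)]
  have h1 : u.length + a - u.length = a := by omega
  rw [h1, List.getElem?_append_left (by simpa using ha)]
  simp [ha]

theorem drop_ctx (u d : List Char) (c : Char) (k a : Nat) (ha : a ≤ k) :
    (u ++ (List.replicate k c ++ d)).drop (u.length + a) = List.replicate (k - a) c ++ d := by
  rw [List.drop_length_add_append, List.drop_append_of_le_length (by simpa using ha), List.drop_replicate]

theorem getLast_append_replicate (u : List Char) (c : Char) (k : Nat) (hk : 1 ≤ k) :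
    (u ++ List.replicate k c).getLast? = some c := by
  obtain ⟨k', rfl⟩ : ∃ k', k = k' + 1 := ⟨k - 1, by omega⟩
  rw [List.getLast?_append]
  simp [List.getLast?_replicate]

theorem pv_guard_false (w₁ rest : List Char) (c : Char) (hr : ∀ y, rest.head? = some y → y ≠ c) :
    (decide ((w₁.length : Int) < ((w₁ ++ rest).length : Int)) && (c == PySem.List.pyGetD (w₁ ++ rest) ((w₁.length : Nat) : Int) 'a')) = false := by
  cases rest with
  | nil => simp
  | cons y t =>
    have hy : y ≠ c := hr y rfl
    have hg : (w₁ ++ y :: t)[w₁.length]? = some y := by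
      rw [List.getElem?_append_right (le_refl _)]
      simp
    rw [PySem.List.pyGetD_natCast]
    have : (w₁ ++ y :: t).getD w₁.length 'a' = y := by
      rw [List.getD, hg]; rfl
    rw [this]
    have hb : (c == y) = false := by
      simp
      exact fun h => absurd h.symm hy
    simp [hb]

theorem slice_nat3 (s : List Char) (a : Nat) (b : Int) (hab : b = (a : Int) + 3) :
    PySem.List.slice s (some (a : Int)) (some b) = (s.drop a).take 3 := by
  have : b = ((a + 3 : Nat) : Int) := by omega
  rw [this, PySem.List.slice_natCast]
  congr 1
  omega

theorem ne_rep3_of_mem {l : List Char} {b c : Char} (hb : b ∈ l) (hne : b ≠ c) :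
    l ≠ List.replicate 3 c := by
  intro h
  exact hne (List.eq_of_mem_replicate (h ▸ hb))

theorem ne_rep3_of_len {l : List Char} {c : Char} (h : l.length ≠ 3) : l ≠ List.replicate 3 c := by
  intro he
  exact h (by simp [he])

theorem pv_mem_slice3 {s : List Char} {a m : Nat} {b : Char} (hm : m < 3)
    (hg : s[a + m]? = some b) : b ∈ (s.drop a).take 3 := by
  have h1 : ((s.drop a).take 3)[m]? = some b := by
    rw [List.getElem?_take_of_lt hm, List.getElem?_drop, hg]
  exact List.mem_of_getElem? h1

theorem pv_getLast_getElem (u : List Char) (hne : u ≠ []) : u[u.length - 1]? = some (u.getLast hne) := by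
  rw [← List.getLast?_eq_getElem?, List.getLast?_eq_getLast_of_ne_nil hne]

theorem pv_len_ne3 {s : List Char} {a b : Int} {x : Char}
    (h : ∀ ca cb : Nat, ca = PySem.List.clampIdx s.length a → cb = PySem.List.clampIdx s.length b → cb - ca ≠ 3) :
    PySem.List.slice s (some a) (some b) ≠ List.replicate 3 x :=
  ne_rep3_of_len (by rw [PySem.List.length_slice]; exact h _ _ rfl rfl)

theorem fail_start (u d : List Char) (x : Char) (hu : ∀ b, u.getLast? = some b → b ≠ x) :
    ((PySem.List.slice (u ++ x :: d) (some ((u.length : Int) - 1)) (some ((u.length : Int) + 2)) != List.replicate 3 x)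
     && (List.replicate 3 x != PySem.List.slice (u ++ x :: d) (some ((u.length : Int) - 2)) (some ((u.length : Int) + 1)))) = true := by
  set s : List Char := u ++ x :: d with hs
  have hlen : s.length = u.length + 1 + d.length := by simp [hs]; omega
  have hmem : 1 ≤ u.length → ∃ b, b ≠ x ∧ s[u.length - 1]? = some b := by
    intro hp
    have hne : u ≠ [] := List.ne_nil_of_length_pos (by omega)
    refine ⟨u.getLast hne, hu _ (List.getLast?_eq_getLast_of_ne_nil hne), ?_⟩
    rw [hs, List.getElem?_append_left (by omega)]
    exact pv_getLast_getElem u hne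
  have h1 : PySem.List.slice s (some ((u.length : Int) - 1)) (some ((u.length : Int) + 2)) ≠ List.replicate 3 x := by
    rcases Nat.lt_or_ge u.length 1 with hp | hp
    · apply pv_len_ne3
      intro ca cb hca hcb
      unfold PySem.List.clampIdx at hca hcb
      split_ifs at hca hcb <;> omega
    · obtain ⟨b, hbx, hgb⟩ := hmem hp
      rw [show (u.length : Int) - 1 = ((u.length - 1 : Nat) : Int) by omega,
          slice_nat3 s (u.length - 1) _ (by omega)]
      exact ne_rep3_of_mem (pv_mem_slice3 (m := 0) (by omega) (by simpa using hgb)) hbx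
  have h2 : PySem.List.slice s (some ((u.length : Int) - 2)) (some ((u.length : Int) + 1)) ≠ List.replicate 3 x := by
    rcases Nat.lt_or_ge u.length 2 with hp | hp
    · apply pv_len_ne3
      intro ca cb hca hcb
      unfold PySem.List.clampIdx at hca hcb
      split_ifs at hca hcb <;> omega
    · obtain ⟨b, hbx, hgb⟩ := hmem (by omega)
      rw [show (u.length : Int) - 2 = ((u.length - 2 : Nat) : Int) by omega,
          slice_nat3 s (u.length - 2) _ (by omega)]
      refine ne_rep3_of_mem (pv_mem_slice3 (m := 1) (by omega) ?_) hbx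
      rw [show u.length - 2 + 1 = u.length - 1 by omega]
      exact hgb
  simp only [Bool.and_eq_true, bne_iff_ne]
  exact ⟨h1, h2.symm⟩

theorem fail_k2 (u d : List Char) (c : Char) (hu : ∀ b, u.getLast? = some b → b ≠ c) (hd : ∀ y, d.head? = some y → y ≠ c) :
    ((PySem.List.slice (u ++ (c :: c :: d)) (some ((u.length : Int))) (some ((u.length : Int) + 3)) != List.replicate 3 c)
     && (List.replicate 3 c != PySem.List.slice (u ++ (c :: c :: d)) (some ((u.length : Int) - 1)) (some ((u.length : Int) + 2)))) = true := by
  set s : List Char := u ++ (c :: c :: d) with hs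
  have hlen : s.length = u.length + 2 + d.length := by simp [hs]; omega
  have h1 : PySem.List.slice s (some ((u.length : Int))) (some ((u.length : Int) + 3)) ≠ List.replicate 3 c := by
    rw [slice_nat3 s u.length _ (by omega), hs, List.drop_left]
    cases d with
    | nil => exact ne_rep3_of_len (by simp)
    | cons y d' =>
      have hy : y ≠ c := hd y rfl
      refine ne_rep3_of_mem (b := y) ?_ hy
      simp [List.take]
  have h2 : PySem.List.slice s (some ((u.length : Int) - 1)) (some ((u.length : Int) + 2)) ≠ List.replicate 3 c := by
    rcases Nat.lt_or_ge u.length 1 with hp | hp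
    · apply pv_len_ne3
      intro ca cb hca hcb
      unfold PySem.List.clampIdx at hca hcb
      split_ifs at hca hcb <;> omega
    · have hne : u ≠ [] := List.ne_nil_of_length_pos (by omega)
      have hbx : u.getLast hne ≠ c := hu _ (List.getLast?_eq_getLast_of_ne_nil hne)
      rw [show (u.length : Int) - 1 = ((u.length - 1 : Nat) : Int) by omega,
          slice_nat3 s (u.length - 1) _ (by omega)]
      refine ne_rep3_of_mem (pv_mem_slice3 (m := 0) (by omega) ?_) hbx
      rw [show u.length - 1 + 0 = u.length - 1 by omega, hs, List.getElem?_append_left (by omega)]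
      exact pv_getLast_getElem u hne
  simp only [Bool.and_eq_true, bne_iff_ne]
  exact ⟨h1, h2.symm⟩

theorem pass_first (u d : List Char) (c : Char) (k t : Nat) (h1 : 1 ≤ t) (h2 : t + 2 ≤ k) :
    PySem.List.slice (u ++ (List.replicate k c ++ d)) (some (((u.length + t : Nat) : Int) - 1)) (some (((u.length + t : Nat) : Int) + 2)) = List.replicate 3 c := by
  rw [show ((u.length + t : Nat) : Int) - 1 = ((u.length + (t - 1) : Nat) : Int) by omega,
      slice_nat3 _ _ _ (by omega), drop_ctx u d c k (t - 1) (by omega),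
      List.take_append_of_le_length (by simp; omega), List.take_replicate]
  congr 1
  omega

theorem pass_second (u d : List Char) (c : Char) (k : Nat) (h3 : 3 ≤ k) :
    PySem.List.slice (u ++ (List.replicate k c ++ d)) (some (((u.length + (k - 1) : Nat) : Int) - 2)) (some (((u.length + (k - 1) : Nat) : Int) + 1)) = List.replicate 3 c := by
  rw [show ((u.length + (k - 1) : Nat) : Int) - 2 = ((u.length + (k - 3) : Nat) : Int) by omega,
      slice_nat3 _ _ _ (by omega), drop_ctx u d c k (k - 3) (by omega),
      List.take_append_of_le_length (by simp; omega), List.take_replicate]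
  congr 1
  omega

theorem checkGo_step (s w : List Char) (i j : Int) (hi : i < (s.length : Int)) :
    checkGo s w i j =
      (if decide (j < (w.length : Int)) && (PySem.List.pyGetD s i 'a' == PySem.List.pyGetD w j 'a') then
        checkGo s w (i + 1) (j + 1)
      else if (PySem.List.slice s (some (i - 1)) (some (i + 2)) != List.replicate 3 (PySem.List.pyGetD s i 'a'))
            && (List.replicate 3 (PySem.List.pyGetD s i 'a') != PySem.List.slice s (some (i - 2)) (some (i + 1))) then
        false
      else checkGo s w (i + 1) j) := by
  rw [checkGo, dif_pos hi]

theorem checkGo_stop (s w : List Char) (i j : Int) (hi : ¬ i < (s.length : Int)) :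
    checkGo s w i j = decide (j = (w.length : Int)) := by
  rw [checkGo, dif_neg hi]

theorem pv_pyGetD_of_some {l : List Char} {n : Nat} {b : Char} (h : l[n]? = some b) :
    PySem.List.pyGetD l ((n : Nat) : Int) 'a' = b := by
  rw [PySem.List.pyGetD_natCast, List.getD_eq_getElem?_getD, h]
  rfl

theorem pv_lt_of_some {l : List Char} {n : Nat} {b : Char} (h : l[n]? = some b) :
    ((n : Nat) : Int) < (l.length : Int) := by
  have := (List.getElem?_eq_some_iff.1 h).1
  exact_mod_cast this

theorem match_steps (s w : List Char) :
    ∀ (r p q : Nat), (∀ t, t < r → ∃ x, s[p + t]? = some x ∧ w[q + t]? = some x) →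
    checkGo s w (p : Int) (q : Int) = checkGo s w ((p + r : Nat) : Int) ((q + r : Nat) : Int) := by
  intro r
  induction r with
  | zero => intro p q _; norm_num
  | succ r ih =>
    intro p q h
    obtain ⟨x, hsx, hwx⟩ := h 0 (by omega)
    rw [Nat.add_zero] at hsx hwx
    rw [checkGo_step s w _ _ (pv_lt_of_some hsx)]
    have hj : decide ((q : Int) < (w.length : Int)) = true := by
      simp only [decide_eq_true_eq]
      exact pv_lt_of_some hwx
    rw [pv_pyGetD_of_some hsx, pv_pyGetD_of_some hwx, hj]
    simp only [Bool.true_and, beq_self_eq_true, if_true]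
    rw [show ((p : Nat) : Int) + 1 = ((p + 1 : Nat) : Int) by omega,
        show ((q : Nat) : Int) + 1 = ((q + 1 : Nat) : Int) by omega,
        ih (p + 1) (q + 1) (fun t ht => by
          rw [show p + 1 + t = p + (t + 1) by omega, show q + 1 + t = q + (t + 1) by omega]
          exact h (t + 1) (by omega))]
    congr 2 <;> omega

theorem skip_steps (u d w : List Char) (c : Char) (k : Nat) (j : Int) (hk : 3 ≤ k)
    (hg : (decide (j < (w.length : Int)) && (c == PySem.List.pyGetD w j 'a')) = false) :
    ∀ (r t : Nat), r = k - t → 1 ≤ t → t ≤ k →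
    checkGo (u ++ (List.replicate k c ++ d)) w ((u.length + t : Nat) : Int) j
      = checkGo (u ++ (List.replicate k c ++ d)) w ((u.length + k : Nat) : Int) j := by
  intro r
  induction r with
  | zero =>
    intro t hr h1 h2
    have : t = k := by omega
    rw [this]
  | succ r ih =>
    intro t hr h1 h2
    have htk : t < k := by omega
    have hsx : (u ++ (List.replicate k c ++ d))[u.length + t]? = some c := getS u d c k t htk
    rw [checkGo_step _ _ _ _ (pv_lt_of_some hsx), pv_pyGetD_of_some hsx, hg]
    simp only [Bool.false_eq_true, if_false]
    have hcond : ((PySem.List.slice (u ++ (List.replicate k c ++ d)) (some (((u.length + t : Nat) : Int) - 1)) (some (((u.length + t : Nat) : Int) + 2)) != List.replicate 3 c)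
        && (List.replicate 3 c != PySem.List.slice (u ++ (List.replicate k c ++ d)) (some (((u.length + t : Nat) : Int) - 2)) (some (((u.length + t : Nat) : Int) + 1)))) = false := by
      rcases Nat.lt_or_ge t (k - 1) with hcase | hcase
      · rw [pass_first u d c k t h1 (by omega)]
        simp
      · have : t = k - 1 := by omega
        subst this
        rw [pass_second u d c k hk]
        simp
    rw [hcond]
    simp only [Bool.false_eq_true, if_false]
    rw [show ((u.length + t : Nat) : Int) + 1 = ((u.length + (t + 1) : Nat) : Int) by omega]
    exact ih (t + 1) (by omega) (by omega) (by omega)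

theorem cmp_cons (cs cw : Char) (ks kw : Nat) (gs gw : List (Char × Nat)) :
    cmpGroups ((cs, ks) :: gs) ((cw, kw) :: gw) =
      (if cs != cw then false
       else if (ks != kw) && (decide (ks < 3) || decide (ks < kw)) then false
       else cmpGroups gs gw) := rfl

theorem run_decomp (c : Char) (v₀ : List Char) :
    ∃ k dw, 1 ≤ k ∧ c :: v₀ = List.replicate k c ++ dw ∧ (∀ y, dw.head? = some y → y ≠ c) ∧ dw.length ≤ v₀.length := by
  refine ⟨(v₀.takeWhile (· == c)).length + 1, v₀.dropWhile (· == c), by omega, ?_, ?_, List.length_dropWhile_le _ _⟩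
  · conv_lhs => rw [← List.takeWhile_append_dropWhile (p := (· == c)) (l := v₀)]
    rw [List.replicate_succ, List.cons_append]
    congr 2
    exact takeWhile_eq_replicate v₀ c
  · intro y hy
    have := head?_dropWhile_ne _ v₀ y hy
    simpa using this

theorem run_decomp0 (c : Char) (w : List Char) :
    ∃ l w', w = List.replicate l c ++ w' ∧ (∀ y, w'.head? = some y → y ≠ c) := by
  refine ⟨(w.takeWhile (· == c)).length, w.dropWhile (· == c), ?_, ?_⟩
  · conv_lhs => rw [← List.takeWhile_append_dropWhile (p := (· == c)) (l := w)]
    congr 1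
    exact takeWhile_eq_replicate w c
  · intro y hy
    have := head?_dropWhile_ne _ w y hy
    simpa using this

theorem base_case (u w₁ w₂ : List Char) :
    checkGo (u ++ []) (w₁ ++ w₂) (u.length : Int) (w₁.length : Int) = cmpGroups (rle []) (rle w₂) := by
  rw [checkGo_stop _ _ _ _ (by simp)]
  cases w₂ with
  | nil => simp [rle, cmpGroups]
  | cons y t =>
    have h0 : rle ([] : List Char) = [] := by rw [rle]
    have h1 : rle (y :: t) = (y, (t.takeWhile (· == y)).length + 1) :: rle (t.dropWhile (· == y)) := by rw [rle]
    have h2 : cmpGroups [] ((y, (t.takeWhile (· == y)).length + 1) :: rle (t.dropWhile (· == y))) = false := rfl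
    rw [h0, h1, h2]
    simp
    omega

theorem getS_end (u d : List Char) (c x : Char) (k : Nat) :
    (u ++ (List.replicate k c ++ (x :: d)))[u.length + k]? = some x := by
  rw [List.getElem?_append_right (by omega), show u.length + k - u.length = k by omega,
      List.getElem?_append_right (by simp), show k - (List.replicate k c).length = 0 by simp]
  rfl

theorem main_lemma : ∀ (N : Nat) (v u w₁ w₂ : List Char), v.length ≤ N →
    (∀ b y, u.getLast? = some b → v.head? = some y → b ≠ y) →
    checkGo (u ++ v) (w₁ ++ w₂) (u.length : Int) (w₁.length : Int) = cmpGroups (rle v) (rle w₂) := by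
  intro N
  induction N with
  | zero =>
    intro v u w₁ w₂ hN hb
    have hv : v = [] := List.eq_nil_of_length_eq_zero (by omega)
    subst hv
    exact base_case u w₁ w₂
  | succ N ih =>
    intro v u w₁ w₂ hN hb
    cases v with
    | nil => exact base_case u w₁ w₂
    | cons c v₀ =>
      obtain ⟨k, dw, hk, hv, hdwh, hdwlen⟩ := run_decomp c v₀
      obtain ⟨l, w₂', hw, hw'h⟩ := run_decomp0 c w₂
      have hbc : ∀ b, u.getLast? = some b → b ≠ c := fun b h => hb b c h rfl
      have hdwN : dw.length ≤ N := by
        have : v₀.length ≤ N := by simpa using hN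
        omega
      rw [hv, hw, rle_run c k dw hk hdwh]
      rcases Nat.eq_zero_or_pos l with hl0 | hl1
      · -- l = 0 : W's current group does not start with c → A fails at the run start
        subst hl0
        simp only [List.replicate_zero, List.nil_append]
        have hs0 : (u ++ (List.replicate k c ++ dw))[u.length + 0]? = some c := getS u dw c k 0 (by omega)
        rw [Nat.add_zero] at hs0
        rw [checkGo_step _ _ _ _ (pv_lt_of_some hs0), pv_pyGetD_of_some hs0,
            pv_guard_false w₁ w₂' c hw'h]
        simp only [Bool.false_eq_true, if_false]
        have hrep : List.replicate k c ++ dw = c :: (List.replicate (k - 1) c ++ dw) := by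
          obtain ⟨k', rfl⟩ : ∃ k', k = k' + 1 := ⟨k - 1, by omega⟩
          rw [List.replicate_succ, List.cons_append]
          simp
        rw [hrep, fail_start u (List.replicate (k - 1) c ++ dw) c hbc]
        simp only [if_true]
        cases w₂' with
        | nil =>
          rw [show rle ([] : List Char) = [] by rw [rle]]
          rfl
        | cons y t =>
          have h1 : rle (y :: t) = (y, (t.takeWhile (· == y)).length + 1) :: rle (t.dropWhile (· == y)) := by rw [rle]
          rw [h1, cmp_cons]
          have : (c != y) = true := by
            simp only [bne_iff_ne, ne_eq]
            exact fun h => (hw'h y rfl) h.symm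
          rw [this]
          simp
      · -- l ≥ 1
        rw [rle_run c l w₂' (by omega) hw'h]
        have hm := match_steps (u ++ (List.replicate k c ++ dw)) (w₁ ++ (List.replicate l c ++ w₂'))
          (min k l) u.length w₁.length
          (fun t ht => ⟨c, getS u dw c k t (by omega), getS w₁ w₂' c l t (by omega)⟩)
        rcases lt_trichotomy k l with hkl | rfl | hlk
        · -- k < l : S's run is exhausted while W still wants c → both false
          rw [min_eq_left (le_of_lt hkl)] at hm
          have hr : cmpGroups ((c, k) :: rle dw) ((c, l) :: rle w₂') = false := by
            rw [cmp_cons]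
            simp only [bne_self_eq_false, Bool.false_eq_true, if_false]
            have h1 : (k != l) = true := by simp; omega
            have h2 : decide (k < l) = true := by simpa using hkl
            rw [h1, h2]
            simp
          rw [hr, hm]
          cases dw with
          | nil =>
            rw [checkGo_stop _ _ _ _ (by
              simp only [List.length_append, List.length_replicate, List.length_nil, Nat.add_zero]
              omega)]
            simp only [decide_eq_false_iff_not]
            simp
            omega
          | cons x d' =>
            have hxc : x ≠ c := hdwh x rfl
            have hsx := getS_end u d' c x k
            rw [checkGo_step _ _ _ _ (pv_lt_of_some hsx), pv_pyGetD_of_some hsx,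
                pv_pyGetD_of_some (getS w₁ w₂' c l k hkl)]
            have hxc' : (x == c) = false := by simpa using hxc
            rw [hxc', Bool.and_false]
            simp only [Bool.false_eq_true, if_false]
            have hass : u ++ (List.replicate k c ++ (x :: d')) = (u ++ List.replicate k c) ++ (x :: d') := by
              rw [List.append_assoc]
            have hlen2 : ((u.length + k : Nat) : Int) = (((u ++ List.replicate k c).length : Nat) : Int) := by simp
            rw [hass, hlen2,
                fail_start (u ++ List.replicate k c) d' x
                  (fun b h => by
                    rw [getLast_append_replicate u c k hk] at h
                    cases h
                    exact fun he => hxc he.symm)]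
            simp
        · -- k = l : the groups match exactly; continue with the next run
          rw [min_self] at hm
          rw [hm, cmp_cons]
          simp only [bne_self_eq_false, Bool.false_eq_true, if_false, Bool.false_and]
          have hass : u ++ (List.replicate k c ++ dw) = (u ++ List.replicate k c) ++ dw := by
            rw [List.append_assoc]
          have hassw : w₁ ++ (List.replicate k c ++ w₂') = (w₁ ++ List.replicate k c) ++ w₂' := by
            rw [List.append_assoc]
          rw [hass, hassw,
              show ((u.length + k : Nat) : Int) = (((u ++ List.replicate k c).length : Nat) : Int) by simp,
              show ((w₁.length + k : Nat) : Int) = (((w₁ ++ List.replicate k c).length : Nat) : Int) by simp]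
          exact ih dw (u ++ List.replicate k c) (w₁ ++ List.replicate k c) w₂' hdwN
            (fun b y hbl hy => by
              rw [getLast_append_replicate u c k hk] at hbl
              cases hbl
              exact fun he => (hdwh y hy) he.symm)
        · -- l < k
          rw [min_eq_right (le_of_lt hlk)] at hm
          rw [hm]
          -- reassociate W around its first group
          have hassw : w₁ ++ (List.replicate l c ++ w₂') = (w₁ ++ List.replicate l c) ++ w₂' := by
            rw [List.append_assoc]
          rw [hassw, show ((w₁.length + l : Nat) : Int) = (((w₁ ++ List.replicate l c).length : Nat) : Int) by simp]
          rcases Nat.lt_or_ge k 3 with hk3 | hk3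
          · -- k = 2, l = 1 : too short to stretch → both false
            have hk2 : k = 2 := by omega
            have hl1 : l = 1 := by omega
            subst hk2; subst hl1
            have hs1 : (u ++ (List.replicate 2 c ++ dw))[u.length + 1]? = some c := getS u dw c 2 1 (by omega)
            rw [show (((u.length + 1 : Nat)) : Int) = (((u.length + 1 : Nat)) : Int) from rfl,
                checkGo_step _ _ _ _ (pv_lt_of_some hs1), pv_pyGetD_of_some hs1,
                pv_guard_false (w₁ ++ List.replicate 1 c) w₂' c hw'h]
            simp only [Bool.false_eq_true, if_false]
            have hrep2 : List.replicate 2 c ++ dw = c :: c :: dw := rfl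
            rw [hrep2,
                show (((u.length + 1 : Nat) : Int)) - 1 = (u.length : Int) by push_cast; ring,
                show (((u.length + 1 : Nat) : Int)) + 2 = (u.length : Int) + 3 by push_cast; ring,
                show (((u.length + 1 : Nat) : Int)) - 2 = (u.length : Int) - 1 by push_cast; ring,
                show (((u.length + 1 : Nat) : Int)) + 1 = (u.length : Int) + 2 by push_cast; ring,
                fail_k2 u dw c hbc hdwh]
            simp only [if_true]
            rw [cmp_cons]
            simp
          · -- k ≥ 3 : skip the unmatched tail of the run, then recurse
            have hgj := pv_guard_false (w₁ ++ List.replicate l c) w₂' c hw'h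
            have hskip := skip_steps u dw ((w₁ ++ List.replicate l c) ++ w₂') c k
              (((w₁ ++ List.replicate l c).length : Nat) : Int) hk3 hgj (k - l) l rfl (by omega) (by omega)
            rw [hskip]
            have hass : u ++ (List.replicate k c ++ dw) = (u ++ List.replicate k c) ++ dw := by
              rw [List.append_assoc]
            rw [hass, show ((u.length + k : Nat) : Int) = (((u ++ List.replicate k c).length : Nat) : Int) by simp]
            rw [cmp_cons]
            simp only [bne_self_eq_false, Bool.false_eq_true, if_false]
            have hcond : ((k != l) && (decide (k < 3) || decide (k < l))) = false := by
              have h1 : decide (k < 3) = false := by simp; omega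
              have h2 : decide (k < l) = false := by simp; omega
              rw [h1, h2]
              simp
            rw [hcond]
            simp only [Bool.false_eq_true, if_false]
            exact ih dw (u ++ List.replicate k c) (w₁ ++ List.replicate l c) w₂' hdwN
              (fun b y hbl hy => by
                rw [getLast_append_replicate u c k hk] at hbl
                cases hbl
                exact fun he => (hdwh y hy) he.symm)

-- ===== VERDICT (by name: the statement is the Claim_ definition above) =====
theorem check_spec : Claim_equal_check := by
  intro S W _
  unfold Spec_check check check_alt
  have h := main_lemma S.toList.length S.toList [] [] W.toList (le_refl _) (by simp)
  simpa using h
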